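-- pv_equiv track=rewrite | github.com/JJMLG/JJMLG | 07.09 ~ 07.16 7월 셋째주/C - 택배 상자/혜진.py | solution
-- ===== SOURCE A (Python) =====
-- def solution(order):
--     st = []
--     o = 0
--     for i in range(1, len(order) + 1):      # i는 1부터 order의 길이까지
--         st.append(i)                        # 일단 넣기
--         while st and st[-1] == order[o]:    # 스택 마지막과 주문이 같으면
--             st.pop()      # pop하고
--             o += 1        # 다음 주문
--     return o              # 주문 어디까지
-- ===== SOURCE B (Python) =====
-- def solution(order):
--     # Stack-free: the would-be stack is always the set of unserved box numbers in
--     # [1, m] (m = highest box delivered so far) in increasing order, so its top is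
--     # the largest unserved number <= m.  We keep a boolean `served` array and find
--     # that top with an amortized downward pointer `cur` instead of a stack.
--     n = len(order)
--     served = [False] * (n + 2)
--     m = 0
--     cur = 0
--     for o, t in enumerate(order):
--         if t > m:                       # box t not delivered yet
--             if t > n:                   # no such box: this order can never be met
--                 return o
--             m = t
--             served[t] = True            # t is handed over the moment it arrives
--             cur = t - 1
--         else:                           # t already delivered: must be current top
--             while cur > 0 and served[cur]:
--                 cur -= 1
--             if cur == 0 or cur != t:    # buried or already served (or t <= 0)
--                 return o
--             served[cur] = True
--             cur -= 1
--     return n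
-- ===== Notes on version B (the rewrite author's own statement) =====
-- stated objective: alternative
-- what changed: Replaced the stack simulation with a stack-free formulation: the would-be stack top is always the largest not-yet-served box number below the delivery threshold m, found with a boolean served array and an amortized downward pointer, so no stack is built at all.
import Mathlib
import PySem

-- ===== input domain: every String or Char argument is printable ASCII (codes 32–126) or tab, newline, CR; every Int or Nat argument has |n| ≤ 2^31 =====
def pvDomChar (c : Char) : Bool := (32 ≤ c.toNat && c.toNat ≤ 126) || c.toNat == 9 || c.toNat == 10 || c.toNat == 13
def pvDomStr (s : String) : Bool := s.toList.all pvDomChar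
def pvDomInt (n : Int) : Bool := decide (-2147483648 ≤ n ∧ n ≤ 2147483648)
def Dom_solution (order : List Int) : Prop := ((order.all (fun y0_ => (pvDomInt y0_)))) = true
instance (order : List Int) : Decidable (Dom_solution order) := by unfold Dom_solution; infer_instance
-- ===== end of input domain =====

-- B is stack-free: a boolean `served` array, a delivery threshold m and an amortized
-- downward pointer replace A's explicit stack (objective: alternative, same cost).

-- ===== PORT A =====
-- A's inner `while st and st[-1] == order[o]`: pop while the top matches the current order.
-- (Python's o only ever counts up from 0, so it is ported as a Nat counter; order[o] = order[o]?.)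
def popLoopA (order : List Int) : List Int → Nat → List Int × Nat
  | [], o => ([], o)
  | t :: rest, o =>
    if order[o]? = some t then popLoopA order rest (o + 1) else (t :: rest, o)

-- stack kept top-first; `for i in range(1, len(order)+1): st.append(i); <while>`
def solution (order : List Int) : Int :=
  (((PySem.List.pyRange 1 ((order.length : Int) + 1) 1).foldl
      (fun s i => popLoopA order (i :: s.1) s.2) ([], 0)).2 : Nat)

-- ===== PORT B =====
-- `while cur > 0 and served[cur]: cur -= 1` (cur is always ≤ n+1 < len(served), so
-- the in-range read served[cur] is exactly getD … false)
def skipServed (served : List Bool) : Nat → Nat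
  | 0 => 0
  | c + 1 => if served.getD (c + 1) false then skipServed served c else c + 1

-- the `for o, t in enumerate(order)` loop with its two early returns; in the t > m
-- branch t > m ≥ 0 always holds, so Python's t-1 / served[t] are t.toNat-1 / set t.toNat
def loopB (n : Nat) (served : List Bool) (m : Int) (cur : Nat) : List Int → Nat → Int
  | [], _o => (n : Int)
  | t :: rest, o =>
      if t > m then
        if t > (n : Int) then (o : Int)
        else loopB n (served.set t.toNat true) t (t.toNat - 1) rest (o + 1)
      else
        let c := skipServed served cur
        if c = 0 ∨ (c : Int) ≠ t then (o : Int)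
        else loopB n (served.set c true) m (c - 1) rest (o + 1)

-- `served = [False] * (n + 2); m = 0; cur = 0`
def solution_alt (order : List Int) : Int :=
  loopB order.length (List.replicate (order.length + 2) false) 0 0 order 0

-- ===== PRECONDITION & SPEC =====
def Spec_solution (order : List Int) (out : Int) : Prop := out = solution_alt order
instance (order : List Int) (out : Int) : Decidable (Spec_solution order out) := by unfold Spec_solution; infer_instance

-- ===== CLAIM (what is proved, stated in full; the proofs are below) =====
def Claim_equal_solution : Prop := ∀ (order : List Int), Dom_solution order → Spec_solution order (solution order)

-- ===== LEMMAS AND PROOFS =====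

-- Common reference function: the interleaved push/pop process, indexed by the order pointer o.
def C (order : List Int) (st : List Int) (nxt : Nat) (o : Nat) : Nat :=
  if h : o < order.length then
    if st.head? = some order[o] then C order st.tail nxt (o + 1)
    else if nxt ≤ order.length then C order ((nxt : Int) :: st) (nxt + 1) o
    else o
  else o
  termination_by (order.length - o, order.length + 1 - nxt)
  decreasing_by
  · exact Prod.Lex.left _ _ (by omega)
  · exact Prod.Lex.right _ (by omega)

-- proof-side helper: "push boxes until the top is t or boxes run out"
def pushLoopB (n : Nat) (t : Int) (st : List Int) (nxt : Nat) : List Int × Nat :=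
  if h : ¬(st.head? = some t) ∧ nxt ≤ n then pushLoopB n t ((nxt : Int) :: st) (nxt + 1)
  else (st, nxt)
  termination_by n + 1 - nxt
  decreasing_by omega

-- a state is stable when A's pop loop would not fire on it
def StableS (order : List Int) (st : List Int) (o : Nat) : Prop :=
  ∀ t, st.head? = some t → ¬ order[o]? = some t

theorem stableS_nil (order : List Int) (o : Nat) : StableS order [] o := by
  intro t ht; simp at ht

theorem popLoopA_stable (order : List Int) (st : List Int) (o : Nat) :
    StableS order (popLoopA order st o).1 (popLoopA order st o).2 := by
  induction st generalizing o with
  | nil => exact stableS_nil order o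
  | cons t rest ih =>
    by_cases h : order[o]? = some t
    · simpa [popLoopA, h] using ih (o + 1)
    · intro u hu hord
      simp [popLoopA, h] at hu hord
      exact h (hu ▸ hord)

theorem C_popLoopA (order : List Int) (st : List Int) (nxt o : Nat) :
    C order st nxt o = C order (popLoopA order st o).1 nxt (popLoopA order st o).2 := by
  induction st generalizing o with
  | nil => simp [popLoopA]
  | cons t rest ih =>
    by_cases h : order[o]? = some t
    · have ho : o < order.length := by
        rcases List.getElem?_eq_some_iff.mp h with ⟨hlt, _⟩; exact hlt
      have hval : order[o] = t := by
        have := List.getElem?_eq_getElem ho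
        rw [this] at h; exact Option.some.inj h
      rw [C]
      simp only [ho, dif_pos, List.head?_cons, hval, List.tail_cons]
      rw [popLoopA, if_pos h]
      exact ih (o + 1)
    · rw [popLoopA, if_neg h]

-- at a stable state with all boxes pushed, C stops at o
theorem C_stop (order : List Int) (st : List Int) (o : Nat)
    (hst : StableS order st o) :
    C order st (order.length + 1) o = o := by
  rw [C]
  by_cases ho : o < order.length
  · have hne : ¬ st.head? = some order[o] := by
      intro hh
      exact hst _ hh (by rw [List.getElem?_eq_getElem ho])
    simp [ho, hne]
  · simp [ho]

-- at a stable state, pushing the next box commutes with C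
theorem C_push_step (order : List Int) (st : List Int) (nxt o : Nat)
    (hn : nxt ≤ order.length) (hst : StableS order st o) :
    C order st nxt o = C order ((nxt : Int) :: st) (nxt + 1) o := by
  conv_lhs => rw [C]
  by_cases ho : o < order.length
  · have hne : ¬ st.head? = some order[o] := by
      intro hh
      exact hst _ hh (by rw [List.getElem?_eq_getElem ho])
    simp [ho, hne, hn]
  · conv_rhs => rw [C]
    simp [ho]

-- C absorbs one push burst followed by at most one pop
theorem C_pushLoopB (order : List Int) (t : Int) (o : Nat)
    (h : order[o]? = some t) :
    ∀ k nxt st, order.length + 1 - nxt = k →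
      C order st nxt o =
        (if (pushLoopB order.length t st nxt).1.head? = some t
         then C order (pushLoopB order.length t st nxt).1.tail (pushLoopB order.length t st nxt).2 (o + 1)
         else o) := by
  have ho : o < order.length := by
    rcases List.getElem?_eq_some_iff.mp h with ⟨hlt, _⟩; exact hlt
  have hval : order[o] = t := by
    have := List.getElem?_eq_getElem ho
    rw [this] at h; exact Option.some.inj h
  intro k
  induction k with
  | zero =>
    intro nxt st hk
    have hn : ¬ nxt ≤ order.length := by omega
    rw [pushLoopB, dif_neg (by simp [hn])]
    by_cases hh : st.head? = some t
    · rw [C]; simp [ho, hval, hh]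
    · rw [C]; simp [ho, hval, hh, hn]
  | succ m ih =>
    intro nxt st hk
    by_cases hh : st.head? = some t
    · rw [pushLoopB, dif_neg (by simp [hh])]
      rw [C]; simp [ho, hval, hh]
    · by_cases hn : nxt ≤ order.length
      · rw [pushLoopB, dif_pos ⟨hh, hn⟩]
        have hC : C order st nxt o = C order ((nxt : Int) :: st) (nxt + 1) o := by
          conv_lhs => rw [C]
          simp [ho, hval, hh, hn]
        rw [hC]
        exact ih (nxt + 1) ((nxt : Int) :: st) (by omega)
      · rw [pushLoopB, dif_neg (by simp [hn])]
        rw [C]; simp [ho, hval, hh, hn]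

-- A computes C
theorem foldA_eq_C (order : List Int) :
    ∀ k (nxt : Nat) st o, nxt + k = order.length + 1 → StableS order st o →
      ((PySem.List.pyRange (nxt : Int) ((order.length : Int) + 1) 1).foldl
          (fun s i => popLoopA order (i :: s.1) s.2) (st, o)).2 = C order st nxt o := by
  intro k
  induction k with
  | zero =>
    intro nxt st o hk hst
    have hnxt : nxt = order.length + 1 := by omega
    rw [PySem.List.pyRange_one_eq_nil (by omega)]
    simp only [List.foldl_nil]
    rw [hnxt, C_stop order st o hst]
  | succ m ih =>
    intro nxt st o hk hst
    have hn : nxt ≤ order.length := by omega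
    rw [PySem.List.pyRange_one_cons (by omega)]
    simp only [List.foldl_cons]
    have hcast : ((nxt : Int) + 1) = ((nxt + 1 : Nat) : Int) := by push_cast; ring
    rw [hcast]
    rw [ih (nxt + 1) (popLoopA order ((nxt : Int) :: st) o).1
        (popLoopA order ((nxt : Int) :: st) o).2 (by omega) (popLoopA_stable order _ o)]
    rw [← C_popLoopA order ((nxt : Int) :: st) (nxt + 1) o]
    exact (C_push_step order st nxt o hn hst).symm

theorem solution_eq_C (order : List Int) : solution order = (C order [] 1 0 : Nat) := by
  unfold solution
  have h := foldA_eq_C order order.length 1 [] 0 (by omega) (stableS_nil order 0)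
  simp only [Nat.cast_one] at h
  rw [h]

-- ===== B side: the invariant tying B's (served, m, cur) to the virtual stack st =====

def InvB (n : Nat) (st : List Int) (served : List Bool) (m : Int) (cur : Nat) : Prop :=
  served.length = n + 2 ∧ 0 ≤ m ∧ m ≤ (n : Int) ∧
  List.Pairwise (· > ·) st ∧
  (∀ x ∈ st, 1 ≤ x ∧ x ≤ m) ∧
  (∀ w : Nat, 1 ≤ w → (w : Int) ≤ m → ((w : Int) ∈ st ∨ served.getD w false = true)) ∧
  (∀ w : Nat, (w : Int) ∈ st → served.getD w false = false) ∧
  (∀ w : Nat, m < (w : Int) → served.getD w false = false) ∧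
  st.head?.getD 0 ≤ (cur : Int) ∧ (cur : Int) ≤ m

-- the pointer scan lands exactly on the virtual stack's top (0 when empty)
theorem skip_eq_top (st : List Int) (served : List Bool) (m : Int)
    (hpw : List.Pairwise (· > ·) st)
    (hb : ∀ x ∈ st, 1 ≤ x)
    (h2 : ∀ w : Nat, 1 ≤ w → (w : Int) ≤ m → ((w : Int) ∈ st ∨ served.getD w false = true))
    (h3 : ∀ w : Nat, (w : Int) ∈ st → served.getD w false = false) :
    ∀ cur : Nat, st.head?.getD 0 ≤ (cur : Int) → (cur : Int) ≤ m →
      ((skipServed served cur : Nat) : Int) = st.head?.getD 0 := by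
  intro cur
  induction cur with
  | zero =>
    intro hc _
    cases st with
    | nil => simp [skipServed]
    | cons h rest =>
      have := hb h (by simp)
      simp at hc; omega
  | succ c ih =>
    intro hc hm
    by_cases hmem : ((c : Int) + 1) ∈ st
    · cases st with
      | nil => simp at hmem
      | cons h rest =>
        have hle : (c : Int) + 1 ≤ h := by
          rcases List.mem_cons.mp hmem with hm1 | hm1
          · omega
          · have := (List.pairwise_cons.mp hpw).1 _ hm1; omega
        have hh : h = (c : Int) + 1 := by simp at hc; omega
        have hsv : served.getD (c + 1) false = false := by
          have := h3 (c + 1) (by push_cast; rw [← hh]; simp)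
          simpa using this
        rw [skipServed, hsv]
        simp [hh]
    · have hsv : served.getD (c + 1) false = true := by
        rcases h2 (c + 1) (by omega) (by push_cast; push_cast at hm; omega) with h | h
        · exact absurd (by push_cast at h ⊢; exact h) hmem
        · simpa using h
      rw [skipServed, hsv]
      simp only []
      apply ih
      · cases st with
        | nil => simp
        | cons h rest =>
          simp at hc ⊢
          have : h ≠ (c : Int) + 1 := fun he => hmem (by rw [← he]; simp)
          omega
      · omega

theorem getD_set_ne' (l : List Bool) (i w : Nat) (b : Bool) (h : w ≠ i) :
    (l.set i b).getD w false = l.getD w false := by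
  simp [List.getD_eq_getElem?_getD, List.getElem?_set_ne (Ne.symm h)]

theorem mem_of_head?' {α : Type} {l : List α} {x : α} (h : l.head? = some x) : x ∈ l := by
  cases l with
  | nil => simp at h
  | cons a t => simp at h; simp [h]

-- the reversed cast range is strictly descending
theorem pairwise_gt_descRange : ∀ (k a : Nat),
    List.Pairwise (· > ·) ((List.range' a k).reverse.map (fun w : Nat => (w : Int))) := by
  intro k
  induction k with
  | zero => intro a; simp
  | succ m ih =>
    intro a
    rw [List.range'_succ, List.reverse_cons, List.map_append, List.pairwise_append]
    refine ⟨ih (a + 1), by simp, ?_⟩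
    intro x hx y hy
    simp only [List.mem_map, List.mem_reverse, List.mem_range'] at hx
    simp only [List.map_cons, List.map_nil, List.mem_singleton] at hy
    obtain ⟨w, ⟨hw1, _⟩, rfl⟩ := hx
    subst hy
    have : a + 1 ≤ w := by omega
    exact_mod_cast this

-- pushing never produces top = t when t is out of reach (t > n or t below every push)
theorem pushLoopB_neverhit (n : Nat) (t : Int) :
    ∀ k nxt st, n + 1 - nxt = k → st.head? ≠ some t → ((n : Int) < t ∨ t < (nxt : Int)) →
      (pushLoopB n t st nxt).1.head? ≠ some t := by
  intro k
  induction k with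
  | zero =>
    intro nxt st hk hh _
    have hn : ¬ nxt ≤ n := by omega
    rw [pushLoopB, dif_neg (by simp [hn])]
    exact hh
  | succ m ih =>
    intro nxt st hk hh hside
    by_cases hn : nxt ≤ n
    · rw [pushLoopB, dif_pos ⟨hh, hn⟩]
      apply ih (nxt + 1) _ (by omega)
      · simp only [List.head?_cons, ne_eq, Option.some.injEq]
        rcases hside with h | h
        · intro he; omega
        · intro he; omega
      · rcases hside with h | h
        · exact Or.inl h
        · right; push_cast; omega
    · rw [pushLoopB, dif_neg (by simp [hn])]
      exact hh

-- when m < t ≤ n, the push burst stacks exactly nxt..t on top and hands over t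
theorem pushLoopB_hit (n : Nat) (t : Int) :
    ∀ k nxt st, t.toNat + 1 - nxt = k → 1 ≤ nxt → (∀ x ∈ st, x < (nxt : Int)) →
      (nxt : Int) ≤ t → t ≤ (n : Int) →
      pushLoopB n t st nxt =
        (t :: ((List.range' nxt (t.toNat - nxt)).reverse.map (fun w : Nat => (w : Int)) ++ st),
         t.toNat + 1) := by
  intro k
  induction k with
  | zero =>
    intro nxt st hk h1 _ hle _
    omega
  | succ m ih =>
    intro nxt st hk h1 hlt hle hn
    have hhne : st.head? ≠ some t := by
      cases st with
      | nil => simp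
      | cons h rest =>
        have := hlt h (by simp)
        simp only [List.head?_cons, ne_eq, Option.some.injEq]
        omega
    have hnn : nxt ≤ n := by omega
    rw [pushLoopB, dif_pos ⟨hhne, hnn⟩]
    by_cases heq : (nxt : Int) = t
    · have hhd : (((nxt : Int) :: st).head? = some t) := by simp [heq]
      rw [pushLoopB, dif_neg (by simp [hhd])]
      have h0 : t.toNat - nxt = 0 := by omega
      simp [h0, heq]
      omega
    · have := ih (nxt + 1) (((nxt : Int)) :: st) (by omega) (by omega)
        (by intro x hx; rcases List.mem_cons.mp hx with h | h
            · subst h; push_cast; omega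
            · have := hlt x h; push_cast; omega)
        (by push_cast; omega) hn
      rw [this]
      have hrange : List.range' nxt (t.toNat - nxt) = nxt :: List.range' (nxt + 1) (t.toNat - (nxt + 1)) := by
        have hd : t.toNat - nxt = (t.toNat - (nxt + 1)) + 1 := by omega
        rw [hd, List.range'_succ]
      rw [hrange]
      simp

-- B computes C
theorem loopB_eq_C (order : List Int) :
    ∀ rest st served m cur o, InvB order.length st served m cur → rest = order.drop o →
      o ≤ order.length →
      loopB order.length served m cur rest o = ((C order st (m.toNat + 1) o : Nat) : Int) := by
  intro rest
  induction rest with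
  | nil =>
    intro st served m cur o hinv hdrop hle
    have : order.length ≤ o := List.drop_eq_nil_iff.mp hdrop.symm
    have ho : o = order.length := by omega
    rw [C]
    simp [loopB, ho]
  | cons t rs ih =>
    intro st served m cur o hinv hdrop hle
    obtain ⟨hlen, hm0, hmn, hpw, hbnd, h2, h3, h8, hcur1, hcur2⟩ := hinv
    have hget : order[o]? = some t := by
      have h0 : (order.drop o)[0]? = some t := by rw [← hdrop]; rfl
      rw [List.getElem?_drop] at h0; simpa using h0
    have ho : o < order.length := by
      rcases List.getElem?_eq_some_iff.mp hget with ⟨hlt, _⟩; exact hlt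
    have hrs : rs = order.drop (o + 1) := by
      have h := congrArg List.tail hdrop
      rw [List.tail_drop] at h; simpa using h
    rw [C_pushLoopB order t o hget (order.length + 1 - (m.toNat + 1)) (m.toNat + 1) st rfl]
    have hmcast : ((m.toNat + 1 : Nat) : Int) = m + 1 := by omega
    by_cases ht : t > m
    · by_cases htn : t > (order.length : Int)
      · -- no such box: both return o
        have hmiss := pushLoopB_neverhit order.length t (order.length + 1 - (m.toNat + 1))
          (m.toNat + 1) st rfl
          (by cases st with
              | nil => simp
              | cons h rest =>
                have := hbnd h (by simp)
                simp only [List.head?_cons, ne_eq, Option.some.injEq]; omega)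
          (Or.inl htn)
        rw [if_neg hmiss]
        rw [loopB, if_pos ht, if_pos htn]
      · -- new maximum t ≤ n
        rw [not_lt] at htn
        have hhit := pushLoopB_hit order.length t (t.toNat + 1 - (m.toNat + 1)) (m.toNat + 1) st rfl
          (by omega)
          (by intro x hx; have := hbnd x hx; omega)
          (by omega) htn
        rw [hhit]
        simp only [List.head?_cons, List.tail_cons, if_pos]
        rw [loopB, if_pos ht, if_neg (by omega)]
        have ht1 : 1 ≤ t := by omega
        -- new invariant
        have hmid : ∀ x ∈ (List.range' (m.toNat + 1) (t.toNat - (m.toNat + 1))).reverse.map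
            (fun w => ((w : Nat) : Int)), m + 1 ≤ x ∧ x < t := by
          intro x hx
          simp only [List.mem_map, List.mem_reverse, List.mem_range'] at hx
          obtain ⟨w, ⟨hw1, hw2⟩, rfl⟩ := hx
          omega
        have hinv' : InvB order.length
            ((List.range' (m.toNat + 1) (t.toNat - (m.toNat + 1))).reverse.map (fun w : Nat => (w : Int)) ++ st)
            (served.set t.toNat true) t (t.toNat - 1) := by
          refine ⟨by simpa using hlen, by omega, htn, ?_, ?_, ?_, ?_, ?_, ?_, by omega⟩
          · rw [List.pairwise_append]
            refine ⟨?_, hpw, ?_⟩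
            · exact pairwise_gt_descRange _ _
            · intro a ha b hb
              have := hmid a ha
              have := hbnd b hb
              omega
          · intro x hx
            rcases List.mem_append.mp hx with h | h
            · have := hmid x h; omega
            · have := hbnd x h; omega
          · intro w hw1 hwt
            by_cases hwm : (w : Int) ≤ m
            · rcases h2 w hw1 hwm with h | h
              · left; exact List.mem_append.mpr (Or.inr h)
              · right
                rw [getD_set_ne' _ _ _ _ (by omega)]
                exact h
            · by_cases hweq : (w : Int) = t
              · right
                have hwn : w = t.toNat := by omega
                rw [hwn]
                rw [List.getD_eq_getElem?_getD, List.getElem?_set_self (by omega)]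
                simp
              · left
                apply List.mem_append.mpr; left
                simp only [List.mem_map, List.mem_reverse, List.mem_range'_1]
                exact ⟨w, by omega, rfl⟩
          · intro w hw
            have hwlt : (w : Int) < t := by
              rcases List.mem_append.mp hw with h | h
              · exact (hmid _ h).2
              · have := hbnd _ h; omega
            rw [getD_set_ne' _ _ _ _ (by omega)]
            rcases List.mem_append.mp hw with h | h
            · exact h8 w (by have := hmid _ h; omega)
            · exact h3 w h
          · intro w hw
            rw [getD_set_ne' _ _ _ _ (by omega)]
            exact h8 w (by omega)
          · -- head ≤ t - 1
            set st1 := (List.range' (m.toNat + 1) (t.toNat - (m.toNat + 1))).reverse.map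
              (fun w => ((w : Nat) : Int)) ++ st with hst1
            cases hh : st1.head? with
            | none => simp
            | some x =>
              have hx : x ∈ st1 := mem_of_head?' hh
              have : x < t := by
                rcases List.mem_append.mp hx with h | h
                · exact (hmid _ h).2
                · have := hbnd _ h; omega
              simp
              omega
        have := ih _ _ t (t.toNat - 1) (o + 1) hinv' hrs (by omega)
        rw [this]
    · -- t ≤ m: t must be the current top
      rw [not_lt] at ht
      have hskip := skip_eq_top st served m hpw (fun x hx => (hbnd x hx).1) h2 h3 cur hcur1 hcur2
      -- unfold one step of pushLoopB
      by_cases hh : st.head? = some t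
      · -- match: pop
        rw [pushLoopB, dif_neg (by simp [hh])]
        rw [if_pos hh]
        have htop : st.head?.getD 0 = t := by rw [hh]; rfl
        have ht1 : 1 ≤ t := by
          cases st with
          | nil => simp at hh
          | cons a rest =>
            have := hbnd a (by simp)
            simp at hh; omega
        have hc : ((skipServed served cur : Nat) : Int) = t := by rw [hskip, htop]
        have hcne : ¬(skipServed served cur = 0 ∨ ((skipServed served cur : Nat) : Int) ≠ t) := by
          rw [not_or, not_not]
          constructor
          · intro h0; rw [h0] at hc; simp at hc; omega
          · exact hc
        rw [loopB, if_neg (by omega)]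
        simp only []
        rw [if_neg hcne]
        -- new invariant for the tail
        cases st with
        | nil => simp at hh
        | cons a rest =>
          have ha : a = t := by simpa using hh
          subst ha
          have hcnat : skipServed served cur = a.toNat := by omega
          have hinv' : InvB order.length rest (served.set (skipServed served cur) true) m
              (skipServed served cur - 1) := by
            have hpw' := (List.pairwise_cons.mp hpw).2
            have hrest_lt : ∀ x ∈ rest, x < a := (List.pairwise_cons.mp hpw).1
            refine ⟨by simpa using hlen, hm0, hmn, hpw', ?_, ?_, ?_, ?_, ?_, ?_⟩
            · intro x hx; exact hbnd x (by simp [hx])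
            · intro w hw1 hwm
              rcases h2 w hw1 hwm with h | h
              · rcases List.mem_cons.mp h with h | h
                · right
                  have hwn : w = a.toNat := by omega
                  rw [hwn, ← hcnat]
                  rw [List.getD_eq_getElem?_getD, List.getElem?_set_self (by
                    rw [hcnat]
                    have := hbnd a (by simp)
                    omega)]
                  simp
                · left; exact h
              · right
                by_cases hwc : w = skipServed served cur
                · rw [hwc, List.getD_eq_getElem?_getD, List.getElem?_set_self (by
                    rw [hcnat]; have := hbnd a (by simp); omega)]
                  simp
                · rw [getD_set_ne' _ _ _ _ (by omega)]
                  exact h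
            · intro w hw
              have hwa : (w : Int) ≠ a := by
                intro he; have := hrest_lt _ hw; omega
              rw [getD_set_ne' _ _ _ _ (by omega)]
              exact h3 w (by simp [hw])
            · intro w hw
              rw [getD_set_ne' _ _ _ _ (by omega)]
              exact h8 w hw
            · cases hhh : rest.head? with
              | none => simp
              | some x =>
                have : x < a := hrest_lt _ (mem_of_head?' hhh)
                have hx1 := (hbnd x (by simp [mem_of_head?' hhh])).1
                simp; omega
            · have := hbnd a (by simp); omega
          have := ih rest _ m (skipServed served cur - 1) (o + 1) hinv' hrs (by omega)
          simpa using this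
      · -- no match: both stop at o
        have hmiss := pushLoopB_neverhit order.length t (order.length + 1 - (m.toNat + 1))
          (m.toNat + 1) st rfl hh (Or.inr (by omega))
        rw [if_neg hmiss]
        rw [loopB, if_neg (by omega)]
        simp only []
        rw [if_pos ?_]
        cases hhd : st.head? with
        | none =>
          left
          have : st.head?.getD 0 = 0 := by simp [hhd]
          rw [this] at hskip; omega
        | some x =>
          right
          have hx : x ∈ st := mem_of_head?' hhd
          have hx1 := (hbnd x hx).1
          have : st.head?.getD 0 = x := by simp [hhd]
          rw [this] at hskip
          have : x ≠ t := by intro he; rw [he] at hhd; exact hh hhd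
          omega

theorem solution_alt_eq_C (order : List Int) :
    solution_alt order = (C order [] 1 0 : Nat) := by
  unfold solution_alt
  have hinv : InvB order.length [] (List.replicate (order.length + 2) false) 0 0 := by
    refine ⟨by simp, le_refl _, by omega, by simp, by simp, ?_, by simp, ?_, by simp, by simp⟩
    · intro w hw1 hw2; omega
    · intro w _
      rw [List.getD_eq_getElem?_getD]
      cases h : (List.replicate (order.length + 2) false)[w]? with
      | none => simp
      | some b =>
        have := List.getElem?_replicate.symm.trans h
        simp at this
        simp [this]
  have := loopB_eq_C order order [] (List.replicate (order.length + 2) false) 0 0 0 hinv (by simp) (by omega)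
  simpa using this

-- ===== VERDICT (by name: the statement is the Claim_ definition above) =====
theorem solution_spec : Claim_equal_solution := by
  intro order _hdom
  unfold Spec_solution
  rw [solution_eq_C, solution_alt_eq_C]
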